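-- pv_equiv track=rewrite | github.com/123wtywty/ccc-2004-j | j5.py | j5_r
-- ===== SOURCE A (Python) =====
-- def j5_r(l):
--     x1, y1, x2, y2 = l[0], l[1], l[2], l[3]
--     sy = y1-y2
--     p_u = [(0,0,0,-1),
--            (0,-1,1,-1),
--            (1,-1,1,-2),
--            (1,-2,0,-2),
--            (0,-2,0,-3)]
--     m_l = []
--     for l_x1, l_y1, l_x2, l_y2 in p_u:
--         l_x1 *= sy//3
--         l_y1 *= sy//3
--         l_x2 *= sy//3
--         l_y2 *= sy//3
--         l_x1 += x1
--         l_x2 += x1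
--         l_y1 += y1
--         l_y2 += y1
--         m_l.append([l_x1, l_y1, l_x2, l_y2])
--     return m_l
-- ===== SOURCE B (Python) =====
-- def j5_r(l):
--     # Turtle walk: start the pen at (x1, y1) and draw five strokes of length
--     # s = (y1 - y2)//3 along relative unit directions; each stroke emits one
--     # segment from the current position and advances the pen.
--     s = (l[1] - l[3]) // 3
--     moves = [(0, -1), (1, 0), (0, -1), (-1, 0), (0, -1)]
--     segs = []
--     cx, cy = l[0], l[1]
--     for dx, dy in moves:
--         nx, ny = cx + dx * s, cy + dy * s
--         segs.append([cx, cy, nx, ny])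
--         cx, cy = nx, ny
--     return segs
-- ===== Notes on version B (the rewrite author's own statement) =====
-- stated objective: alternative
-- what changed: B draws the figure as a turtle walk: a pen starts at (x1,y1) and advances along five relative unit moves of length (y1-y2)//3, emitting each stroke from its running position, instead of A's scaling and offsetting of five absolute pre-split segment templates.
import Mathlib
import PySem

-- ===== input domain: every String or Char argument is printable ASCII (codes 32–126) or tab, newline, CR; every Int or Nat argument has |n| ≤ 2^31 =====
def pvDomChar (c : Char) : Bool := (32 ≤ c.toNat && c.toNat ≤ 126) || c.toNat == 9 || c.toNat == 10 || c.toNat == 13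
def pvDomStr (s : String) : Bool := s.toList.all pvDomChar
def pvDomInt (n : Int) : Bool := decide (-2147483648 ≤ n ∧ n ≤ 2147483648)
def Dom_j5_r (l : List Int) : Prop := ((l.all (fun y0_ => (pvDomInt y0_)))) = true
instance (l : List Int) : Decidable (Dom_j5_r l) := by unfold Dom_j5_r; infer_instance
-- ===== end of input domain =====

-- B draws the figure as a turtle walk: a pen advances along five relative unit
-- moves, emitting each stroke from its running position (objective: alternative),
-- instead of A's scaling/offsetting of five absolute pre-split segment templates.

-- ===== PORT A =====
def j5_r (l : List Int) : List (List Int) :=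
  let x1 := (PySem.List.pyGet? l 0).getD 0
  let y1 := (PySem.List.pyGet? l 1).getD 0
  let y2 := (PySem.List.pyGet? l 3).getD 0
  let sy := y1 - y2
  let p_u : List (Int × Int × Int × Int) :=
    [(0,0,0,-1), (0,-1,1,-1), (1,-1,1,-2), (1,-2,0,-2), (0,-2,0,-3)]
  p_u.foldl (fun m_l t =>
    let lx1 := t.1 * PySem.Int.floordiv sy 3
    let ly1 := t.2.1 * PySem.Int.floordiv sy 3
    let lx2 := t.2.2.1 * PySem.Int.floordiv sy 3
    let ly2 := t.2.2.2 * PySem.Int.floordiv sy 3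
    m_l ++ [[lx1 + x1, ly1 + y1, lx2 + x1, ly2 + y1]]) []

-- ===== PORT B =====
def j5_r_alt (l : List Int) : List (List Int) :=
  let s := PySem.Int.floordiv ((PySem.List.pyGet? l 1).getD 0 - (PySem.List.pyGet? l 3).getD 0) 3
  let moves : List (Int × Int) := [(0,-1), (1,0), (0,-1), (-1,0), (0,-1)]
  let st := moves.foldl (fun (acc : List (List Int) × Int × Int) d =>
    let nx := acc.2.1 + d.1 * s
    let ny := acc.2.2 + d.2 * s
    (acc.1 ++ [[acc.2.1, acc.2.2, nx, ny]], nx, ny))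
    ([], (PySem.List.pyGet? l 0).getD 0, (PySem.List.pyGet? l 1).getD 0)
  st.1

-- ===== PRECONDITION & SPEC =====
-- A indexes the first four list elements and raises IndexError on shorter lists; exactly those are excluded.
def Pre_j5_r (l : List Int) : Prop := 4 ≤ l.length
instance (l : List Int) : Decidable (Pre_j5_r l) := by unfold Pre_j5_r; infer_instance
def pvWitness_j5_r : List Int := [3, 9, 5, 0]
def Spec_j5_r (l : List Int) (out : List (List Int)) : Prop := out = j5_r_alt l
instance (l : List Int) (out : List (List Int)) : Decidable (Spec_j5_r l out) := by unfold Spec_j5_r; infer_instance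

-- ===== CLAIM (what is proved, stated in full; the proofs are below) =====
def Claim_equal_j5_r : Prop := ∀ (l : List Int), Dom_j5_r l → Pre_j5_r l → Spec_j5_r l (j5_r l)

-- ===== LEMMAS AND PROOFS =====

-- ===== VERDICT (by name: the statement is the Claim_ definition above) =====
theorem j5_r_spec : Claim_equal_j5_r := by
  intro l _ _
  unfold Spec_j5_r j5_r j5_r_alt
  simp only [List.foldl, List.cons.injEq, List.nil_append, List.cons_append, and_true]
  omega
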